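-- pv_equiv track=rewrite | github.com/itssagunkarki/tempint | constraint-check.py | operator_is_present
-- ===== SOURCE A (Python) =====
-- import functools
-- from typing import Dict, Iterable, IO, List, Optional, Set, Tuple, Union
--
-- def operator_is_present(operator: str, line: str, all_operators: Iterable[str]) -> bool:
--     found_operator = False
--     if operator in line:
--         fragments = line.split(operator)
--         if len(fragments) > 1:
--             # is it part of a string or a literal character?
--             is_a_character = True
--             for i in range(1, len(fragments)):
--                 number_of_quotes_to_left = functools.reduce(lambda x, y: x + y,
--                                                             [fragment.count('"') for fragment in fragments[:i]])
--                 number_of_quotes_to_right = functools.reduce(lambda x, y: x+y,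
--                                                              [fragment.count('"') for fragment in fragments[i:]])
--                 character_to_left = ' ' if len(fragments[i - 1]) == 0 else fragments[i - 1][-1]
--                 character_to_right = ' ' if len(fragments[i]) == 0 else fragments[i][0]
--                 if not (character_to_left == '\'' and character_to_right == '\''
--                         or (number_of_quotes_to_left % 2 == 1) and (number_of_quotes_to_right % 2 == 1)):
--                     is_a_character = False
--             # TODO: is it really a pointer/reference?
--             part_of_a_pointer = False
--             pass
--             # is it really part of a different operator?
--             part_of_another_operator = False
--             possible_other_operators = {op for op in all_operators if operator in op and operator != op}
--             for other_operator in possible_other_operators: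
--                 # TODO: handle 3-character operators
--                 assert len(operator) == 1 and len(other_operator) == 2
--                 for i in range(1, len(fragments)):
--                     next_character = operator[0] if len(fragments[i]) == 0 else fragments[i][0]
--                     previous_character = operator[0] if len(fragments[i-1]) == 0 else fragments[i - 1][-1]
--                     if operator[0] == other_operator[0] and other_operator[1] == next_character \
--                             or operator[0] == other_operator[1] and other_operator[0] == previous_character:
--                         part_of_another_operator = True
--             found_operator = not is_a_character and not part_of_a_pointer and not part_of_another_operator
--     return found_operator
-- ===== SOURCE B (Python) =====
-- def operator_is_present(operator, line, all_operators):
--     if operator not in line: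
--         return False
--     fragments = line.split(operator)
--     total = sum(f.count('"') for f in fragments)
--     left = 0
--     all_char = True
--     for prev, cur in zip(fragments, fragments[1:]):
--         left += prev.count('"')
--         cl = prev[-1] if prev else ' '
--         cr = cur[0] if cur else ' '
--         if not ((cl == "'" and cr == "'") or (left % 2 == 1 and (total - left) % 2 == 1)):
--             all_char = False
--             break
--     if all_char:
--         return False
--     prevs = {prev[-1] if prev else operator[0] for prev in fragments[:-1]}
--     nexts = {cur[0] if cur else operator[0] for cur in fragments[1:]}
--     for op in all_operators:
--         if op != operator and operator in op:
--             if (operator[0] == op[0] and op[1] in nexts) or (operator[0] == op[1] and op[0] in prevs):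
--                 return False
--     return True
-- ===== Notes on version B (the rewrite author's own statement) =====
-- stated objective: alternative
-- what changed: B replaces A's per-gap functools.reduce re-summation of quote counts over all fragments by a single running prefix sum with early exit, and replaces A's nested loop over candidate operators and gaps by neighbour-character sets (prevs/nexts) built once with one membership test per candidate operator.
import Mathlib
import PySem

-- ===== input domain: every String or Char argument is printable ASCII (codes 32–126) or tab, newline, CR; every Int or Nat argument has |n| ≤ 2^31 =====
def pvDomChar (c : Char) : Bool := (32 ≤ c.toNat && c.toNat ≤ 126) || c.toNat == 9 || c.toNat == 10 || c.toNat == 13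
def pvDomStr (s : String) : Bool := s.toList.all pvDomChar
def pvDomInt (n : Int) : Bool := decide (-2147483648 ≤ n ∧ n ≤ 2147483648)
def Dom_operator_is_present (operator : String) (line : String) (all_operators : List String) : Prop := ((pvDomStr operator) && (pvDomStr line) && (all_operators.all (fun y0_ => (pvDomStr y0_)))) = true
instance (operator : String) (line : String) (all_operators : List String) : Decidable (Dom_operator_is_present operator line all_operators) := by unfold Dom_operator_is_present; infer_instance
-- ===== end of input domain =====

-- B replaces A's per-gap re-summation of quote counts by one running prefix sum and the
-- nested other-operator/gap scan by neighbour-character sets built once: a different algorithm over the same data, exact same results.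


-- ===== PORT A =====
-- functools.reduce(lambda x, y: x + y, l); A only applies it to nonempty lists (Python raises on [])
def pyReduceAdd (l : List Int) : Int :=
  match l with
  | [] => 0
  | x :: xs => xs.foldl (· + ·) x

def operator_is_present (operator : String) (line : String) (all_operators : List String) : Bool :=
  -- found_operator = False; if operator in line:
  if PySem.Str.isIn operator line then
    -- fragments = line.split(operator); ValueError (operator == "") modelled as none, excluded by Pre_
    match PySem.Str.split? line operator with
    | none => false
    | some fragments =>
      if 1 < fragments.length then
        let is_a_character :=
          (PySem.List.pyRange 1 (fragments.length : Int) 1).foldl (fun is_a_character i =>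
            let number_of_quotes_to_left :=
              pyReduceAdd ((PySem.List.slice fragments none (some i)).map
                (fun fragment => (PySem.Str.count fragment "\"" : Int)))
            let number_of_quotes_to_right :=
              pyReduceAdd ((PySem.List.slice fragments (some i) none).map
                (fun fragment => (PySem.Str.count fragment "\"" : Int)))
            let fprev := PySem.List.pyGetD fragments (i - 1) ""
            let fcur := PySem.List.pyGetD fragments i ""
            let character_to_left := if PySem.Str.len fprev = 0 then ' ' else (PySem.Str.pyGet? fprev (-1)).getD ' '
            let character_to_right := if PySem.Str.len fcur = 0 then ' ' else (PySem.Str.pyGet? fcur 0).getD ' '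
            if !((character_to_left == '\'' && character_to_right == '\'') ||
                 (PySem.Int.mod number_of_quotes_to_left 2 == 1 && PySem.Int.mod number_of_quotes_to_right 2 == 1)) then
              false
            else is_a_character) true
        let part_of_a_pointer := false
        let possible_other_operators : PySem.Set String :=
          PySem.Set.ofList (all_operators.filter (fun op => PySem.Str.isIn operator op && operator != op))
        -- the loop only accumulates an OR, so iterating the set in insertion order is exact;
        -- the Python 'assert' can only fail outside Pre_ and is not modelled
        let part_of_another_operator :=
          possible_other_operators.foldl (fun part other_operator =>
            (PySem.List.pyRange 1 (fragments.length : Int) 1).foldl (fun part i =>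
              let fprev := PySem.List.pyGetD fragments (i - 1) ""
              let fcur := PySem.List.pyGetD fragments i ""
              let next_character := if PySem.Str.len fcur = 0 then (PySem.Str.pyGet? operator 0).getD ' '
                                    else (PySem.Str.pyGet? fcur 0).getD ' '
              let previous_character := if PySem.Str.len fprev = 0 then (PySem.Str.pyGet? operator 0).getD ' '
                                        else (PySem.Str.pyGet? fprev (-1)).getD ' '
              if ((PySem.Str.pyGet? operator 0).getD ' ' == (PySem.Str.pyGet? other_operator 0).getD ' ' &&
                  (PySem.Str.pyGet? other_operator 1).getD ' ' == next_character) ||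
                 ((PySem.Str.pyGet? operator 0).getD ' ' == (PySem.Str.pyGet? other_operator 1).getD ' ' &&
                  (PySem.Str.pyGet? other_operator 0).getD ' ' == previous_character) then true
              else part) part) false
        (!is_a_character && !part_of_a_pointer && !part_of_another_operator)
      else false
  else false

-- ===== PORT B =====
-- the for-loop with break over zip(fragments, fragments[1:]) carrying the running prefix sum `left`
def altScanB (total : Int) : List (String × String) → Int → Bool
  | [], _ => true
  | (prev, cur) :: rest, left =>
    let left := left + (PySem.Str.count prev "\"" : Int)
    let cl := (PySem.Str.pyGet? prev (-1)).getD ' '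
    let cr := (PySem.Str.pyGet? cur 0).getD ' '
    if !((cl == '\'' && cr == '\'') ||
         (PySem.Int.mod left 2 == 1 && PySem.Int.mod (total - left) 2 == 1)) then false
    else altScanB total rest left

def operator_is_present_alt (operator : String) (line : String) (all_operators : List String) : Bool :=
  if !(PySem.Str.isIn operator line) then false
  else
    match PySem.Str.split? line operator with
    | none => false  -- ValueError (operator == ""), excluded by Pre_
    | some fragments =>
      let total := (fragments.map (fun f => (PySem.Str.count f "\"" : Int))).sum
      if altScanB total (fragments.zip (fragments.drop 1)) 0 then false
      else
        let c0 := (PySem.Str.pyGet? operator 0).getD ' '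
        let prevs : PySem.Set Char :=
          PySem.Set.ofList ((PySem.List.slice fragments none (some (-1))).map
            (fun prev => (PySem.Str.pyGet? prev (-1)).getD c0))
        let nexts : PySem.Set Char :=
          PySem.Set.ofList ((PySem.List.slice fragments (some 1) none).map
            (fun cur => (PySem.Str.pyGet? cur 0).getD c0))
        !(all_operators.any (fun op =>
            (op != operator && PySem.Str.isIn operator op) &&
            ((c0 == (PySem.Str.pyGet? op 0).getD ' ' && PySem.Set.contains nexts ((PySem.Str.pyGet? op 1).getD ' ')) ||
             (c0 == (PySem.Str.pyGet? op 1).getD ' ' && PySem.Set.contains prevs ((PySem.Str.pyGet? op 0).getD ' ')))))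

-- ===== PRECONDITION & SPEC =====
-- Pre_ excludes exactly the inputs where the Python A raises: operator == "" (line.split("") is a
-- ValueError) and inputs where some listed operator strictly containing an operator present in the
-- line does not have the 1-char-inside-2-char shape A's assert demands (AssertionError).
def Pre_operator_is_present (operator : String) (line : String) (all_operators : List String) : Prop :=
  operator ≠ "" ∧
  ∀ op ∈ all_operators,
    (op ≠ operator ∧ PySem.Str.isIn operator op = true ∧ PySem.Str.isIn operator line = true) →
    (PySem.Str.len operator = 1 ∧ PySem.Str.len op = 2)
instance (operator : String) (line : String) (all_operators : List String) : Decidable (Pre_operator_is_present operator line all_operators) := by unfold Pre_operator_is_present; infer_instance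

def pvWitness_operator_is_present : String × String × List String := ("+", "a+b", ["+="])

def Spec_operator_is_present (operator : String) (line : String) (all_operators : List String) (out : Bool) : Prop := out = operator_is_present_alt operator line all_operators
instance (operator : String) (line : String) (all_operators : List String) (out : Bool) : Decidable (Spec_operator_is_present operator line all_operators out) := by unfold Spec_operator_is_present; infer_instance

-- ===== CLAIM (what is proved, stated in full; the proofs are below) =====
def Claim_equal_operator_is_present : Prop := ∀ (operator : String) (line : String) (all_operators : List String), Dom_operator_is_present operator line all_operators → Pre_operator_is_present operator line all_operators → Spec_operator_is_present operator line all_operators (operator_is_present operator line all_operators)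

-- ===== LEMMAS AND PROOFS =====

theorem headD (f : String) (d : Char) :
    (if PySem.Str.len f = 0 then d else (PySem.Str.pyGet? f 0).getD ' ') = (PySem.Str.pyGet? f 0).getD d := by
  rcases h : f.toList with _ | ⟨c, cs⟩ <;>
    simp [PySem.Str.len, h, PySem.List.pyGet?, PySem.List.pyIdx?] <;> omega
theorem lastD (f : String) (d : Char) :
    (if PySem.Str.len f = 0 then d else (PySem.Str.pyGet? f (-1)).getD ' ') = (PySem.Str.pyGet? f (-1)).getD d := by
  rcases h : f.toList with _ | ⟨c, cs⟩ <;>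
    simp [PySem.Str.len, h, PySem.List.pyGet?, PySem.List.pyIdx?] <;> omega
theorem reduce_sum (l : List Int) : pyReduceAdd l = l.sum := by
  cases l with
  | nil => rfl
  | cons x xs => simpa [pyReduceAdd] using (PySem.List.foldl_add (g := fun y : Int => y) (l := xs) (a := x)).trans (by simp)

def pvCnt (f : String) : Int := (PySem.Str.count f "\"" : Int)
def pvGap (p c : String) (L total : Int) : Bool :=
  (((PySem.Str.pyGet? p (-1)).getD ' ' == '\'') && ((PySem.Str.pyGet? c 0).getD ' ' == '\'')) ||
  (PySem.Int.mod L 2 == 1 && PySem.Int.mod (total - L) 2 == 1)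
def pvGapsAll (total : Int) : List String → Int → Bool
  | p :: c :: rest, left => pvGap p c (left + pvCnt p) total && pvGapsAll total (c :: rest) (left + pvCnt p)
  | _, _ => true

theorem altScanB_cons (total left : Int) (p c : String) (rest : List (String × String)) :
    altScanB total ((p, c) :: rest) left =
      (pvGap p c (left + pvCnt p) total && altScanB total rest (left + pvCnt p)) := by
  show (if !(pvGap p c (left + pvCnt p) total) then false else altScanB total rest (left + pvCnt p)) = _
  cases pvGap p c (left + pvCnt p) total <;> simp

theorem altScanB_eq (total : Int) (fs : List String) (left : Int) :
    altScanB total (fs.zip (fs.drop 1)) left = pvGapsAll total fs left := by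
  induction fs generalizing left with
  | nil => rfl
  | cons p rest ih =>
    cases rest with
    | nil => rfl
    | cons c rest' =>
      show altScanB total ((p, c) :: (c :: rest').zip ((c :: rest').drop 1)) left = _
      rw [altScanB_cons, ih]
      rfl

def pvCondA (fs : List String) (i : Int) : Bool :=
  ((if PySem.Str.len (PySem.List.pyGetD fs (i - 1) "") = 0 then ' '
    else (PySem.Str.pyGet? (PySem.List.pyGetD fs (i - 1) "") (-1)).getD ' ') == '\'' &&
   (if PySem.Str.len (PySem.List.pyGetD fs i "") = 0 then ' '
    else (PySem.Str.pyGet? (PySem.List.pyGetD fs i "") 0).getD ' ') == '\'') ||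
  (PySem.Int.mod (pyReduceAdd ((PySem.List.slice fs none (some i)).map
      (fun fragment => (PySem.Str.count fragment "\"" : Int)))) 2 == 1 &&
   PySem.Int.mod (pyReduceAdd ((PySem.List.slice fs (some i) none).map
      (fun fragment => (PySem.Str.count fragment "\"" : Int)))) 2 == 1)

theorem take_drop_sum (fs : List String) (m : Nat) :
    ((fs.drop m).map pvCnt).sum = (fs.map pvCnt).sum - ((fs.take m).map pvCnt).sum := by
  have h : ((fs.take m).map pvCnt).sum + ((fs.drop m).map pvCnt).sum = (fs.map pvCnt).sum := by
    conv_rhs => rw [← List.take_append_drop m fs]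
    rw [List.map_append, List.sum_append]
  omega

theorem condA_at (fs : List String) (k : Nat) (hk : k + 1 < fs.length) :
    pvCondA fs (((k + 1 : Nat) : Int)) =
      pvGap fs[k] fs[k + 1] (((fs.take (k + 1)).map pvCnt).sum) ((fs.map pvCnt).sum) := by
  unfold pvCondA pvGap
  rw [PySem.List.slice_to_natCast, PySem.List.slice_from_natCast]
  rw [show ((k + 1 : Nat) : Int) - 1 = ((k : Nat) : Int) by push_cast; ring]
  rw [PySem.List.pyGetD_natCast, PySem.List.pyGetD_natCast]
  rw [List.getD_eq_getElem fs "" (by omega), List.getD_eq_getElem fs "" (by omega)]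
  rw [headD, lastD, reduce_sum, reduce_sum]
  rw [show ((fs.drop (k+1)).map (fun f => (PySem.Str.count f "\"" : Int))).sum
      = (fs.map pvCnt).sum - ((fs.take (k+1)).map pvCnt).sum from take_drop_sum fs (k+1)]
  rw [show pvCnt = (fun f => (PySem.Str.count f "\"" : Int)) from rfl]

theorem pvGapsAll_iff (total : Int) (fs : List String) (left : Int) :
    pvGapsAll total fs left = true ↔
      ∀ k (_ : k + 1 < fs.length),
        pvGap fs[k] fs[k + 1] (left + ((fs.take (k + 1)).map pvCnt).sum) total = true := by
  induction fs generalizing left with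
  | nil => simp [pvGapsAll]
  | cons p rest ih =>
    cases rest with
    | nil => simp [pvGapsAll]
    | cons c rest' =>
      rw [show pvGapsAll total (p :: c :: rest') left
          = (pvGap p c (left + pvCnt p) total && pvGapsAll total (c :: rest') (left + pvCnt p)) from rfl]
      rw [Bool.and_eq_true, ih]
      constructor
      · rintro ⟨h0, h⟩ k hk
        cases k with
        | zero => simpa using h0
        | succ j =>
          have := h j (by simp at hk ⊢; omega)
          simpa [List.take_succ_cons, add_assoc] using this
      · intro h
        refine ⟨by simpa using h 0 (by simp), fun j hj => ?_⟩
        have := h (j + 1) (by simp at hj ⊢; omega)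
        simpa [List.take_succ_cons, add_assoc] using this

theorem foldA_eq (fs : List String) :
    (PySem.List.pyRange 1 (fs.length : Int) 1).foldl
        (fun acc i => if !(pvCondA fs i) then false else acc) true
      = pvGapsAll ((fs.map pvCnt).sum) fs 0 := by
  rw [PySem.List.foldl_if_false_eq, Bool.true_and]
  rw [Bool.eq_iff_iff]
  simp only [Bool.not_eq_true', List.any_eq_false, Bool.not_eq_false]
  rw [pvGapsAll_iff]
  constructor
  · intro h k hk
    have hi : ((k + 1 : Nat) : Int) ∈ PySem.List.pyRange 1 (fs.length : Int) 1 := by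
      rw [PySem.List.mem_pyRange_one]; constructor <;> [push_cast; push_cast] <;> omega
    have := h _ hi
    rw [condA_at fs k hk] at this
    simpa using this
  · intro h i hi
    rw [PySem.List.mem_pyRange_one] at hi
    have hk1 : i = ((i.toNat - 1 + 1 : Nat) : Int) := by omega
    rw [hk1, condA_at fs (i.toNat - 1) (by omega)]
    have := h (i.toNat - 1) (by omega)
    simpa using this

theorem foldl_or {α : Type} (g : α → Bool) (l : List α) (b : Bool) :
    l.foldl (fun acc x => acc || g x) b = (b || l.any g) := by
  have h : (fun (acc : Bool) (x : α) => acc || g x) = (fun acc x => if g x then true else acc) := by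
    funext acc x; cases g x <;> simp
  rw [h, PySem.List.foldl_if_true_eq]

theorem any_ofList {α : Type} [BEq α] [LawfulBEq α] (l : List α) (g : α → Bool) :
    (PySem.Set.ofList l).any g = l.any g := by
  rw [Bool.eq_iff_iff]
  simp only [List.any_eq_true]
  constructor
  · rintro ⟨x, hx, hg⟩; exact ⟨x, (PySem.Set.mem_ofList l x).mp hx, hg⟩
  · rintro ⟨x, hx, hg⟩; exact ⟨x, (PySem.Set.mem_ofList l x).mpr hx, hg⟩

theorem mem_tail_map (fs : List String) (h : String → Char) (y : Char) :
    y ∈ fs.tail.map h ↔ ∃ k, ∃ _ : k + 1 < fs.length, h fs[k + 1] = y := by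
  rw [List.mem_map]
  constructor
  · rintro ⟨cur, hc, hy⟩
    rw [List.mem_iff_getElem] at hc
    obtain ⟨k, hk, hcur⟩ := hc
    refine ⟨k, by simp at hk; omega, ?_⟩
    rw [← hy, ← hcur, List.getElem_tail]
  · rintro ⟨k, hk, hy⟩
    exact ⟨fs[k + 1], by rw [← List.getElem_tail (by simp; omega)]; exact List.getElem_mem _, hy⟩

theorem mem_dropLast_map (fs : List String) (h : String → Char) (y : Char) :
    y ∈ fs.dropLast.map h ↔ ∃ k, ∃ _ : k + 1 < fs.length, h fs[k] = y := by
  rw [List.mem_map]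
  constructor
  · rintro ⟨prev, hc, hy⟩
    rw [List.mem_iff_getElem] at hc
    obtain ⟨k, hk, hprev⟩ := hc
    refine ⟨k, by simp at hk; omega, ?_⟩
    rw [← hy, ← hprev, List.getElem_dropLast]
  · rintro ⟨k, hk, hy⟩
    exact ⟨fs[k], by rw [← List.getElem_dropLast (by simp; omega)]; exact List.getElem_mem _, hy⟩

theorem pyGetD_at (fs : List String) (i : Int) (h1 : 0 ≤ i) :
    PySem.List.pyGetD fs i "" = fs.getD i.toNat "" := by
  have h : i = ((i.toNat : Nat) : Int) := by omega
  rw [h, PySem.List.pyGetD_natCast, Int.toNat_natCast]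

theorem opCond_eq (operator : String) (fs : List String) (op : String) :
    (PySem.List.pyRange 1 (fs.length : Int) 1).any (fun i =>
      ((PySem.Str.pyGet? operator 0).getD ' ' == (PySem.Str.pyGet? op 0).getD ' ' &&
       (PySem.Str.pyGet? op 1).getD ' ' ==
         (if PySem.Str.len (PySem.List.pyGetD fs i "") = 0 then (PySem.Str.pyGet? operator 0).getD ' '
          else (PySem.Str.pyGet? (PySem.List.pyGetD fs i "") 0).getD ' ')) ||
      ((PySem.Str.pyGet? operator 0).getD ' ' == (PySem.Str.pyGet? op 1).getD ' ' &&
       (PySem.Str.pyGet? op 0).getD ' ' ==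
         (if PySem.Str.len (PySem.List.pyGetD fs (i - 1) "") = 0 then (PySem.Str.pyGet? operator 0).getD ' '
          else (PySem.Str.pyGet? (PySem.List.pyGetD fs (i - 1) "") (-1)).getD ' ')))
    =
    (((PySem.Str.pyGet? operator 0).getD ' ' == (PySem.Str.pyGet? op 0).getD ' ' &&
      PySem.Set.contains
        (PySem.Set.ofList ((PySem.List.slice fs (some 1) none).map
          (fun cur => (PySem.Str.pyGet? cur 0).getD ((PySem.Str.pyGet? operator 0).getD ' '))))
        ((PySem.Str.pyGet? op 1).getD ' ')) ||
     ((PySem.Str.pyGet? operator 0).getD ' ' == (PySem.Str.pyGet? op 1).getD ' ' &&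
      PySem.Set.contains
        (PySem.Set.ofList ((PySem.List.slice fs none (some (-1))).map
          (fun prev => (PySem.Str.pyGet? prev (-1)).getD ((PySem.Str.pyGet? operator 0).getD ' '))))
        ((PySem.Str.pyGet? op 0).getD ' '))) := by
  rw [PySem.List.slice_from_one, PySem.List.slice_to_neg_one, Bool.eq_iff_iff]
  simp only [List.any_eq_true, Bool.or_eq_true, Bool.and_eq_true, beq_iff_eq,
    PySem.Set.contains_iff, PySem.Set.mem_ofList, mem_tail_map, mem_dropLast_map]
  constructor
  · rintro ⟨i, hi, hc⟩
    rw [PySem.List.mem_pyRange_one] at hi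
    rw [pyGetD_at fs i (by omega), pyGetD_at fs (i - 1) (by omega),
      List.getD_eq_getElem fs "" (show i.toNat < fs.length by omega),
      List.getD_eq_getElem fs "" (show (i - 1).toNat < fs.length by omega),
      headD, lastD] at hc
    rcases hc with ⟨h1, h2⟩ | ⟨h1, h2⟩
    · refine Or.inl ⟨h1, i.toNat - 1, by omega, ?_⟩
      have hidx : i.toNat - 1 + 1 = i.toNat := by omega
      simp only [hidx]
      exact h2.symm
    · refine Or.inr ⟨h1, (i - 1).toNat, by omega, h2.symm⟩
  · rintro (⟨h1, k, hk, hy⟩ | ⟨h1, k, hk, hy⟩)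
    · refine ⟨((k + 1 : Nat) : Int), by rw [PySem.List.mem_pyRange_one]; omega, ?_⟩
      rw [pyGetD_at fs ((k + 1 : Nat) : Int) (by omega), Int.toNat_natCast,
        List.getD_eq_getElem fs "" (show k + 1 < fs.length by omega), headD]
      exact Or.inl ⟨h1, hy.symm⟩
    · refine ⟨((k + 1 : Nat) : Int), by rw [PySem.List.mem_pyRange_one]; omega, ?_⟩
      rw [show ((k + 1 : Nat) : Int) - 1 = ((k : Nat) : Int) by push_cast; ring]
      rw [pyGetD_at fs ((k : Nat) : Int) (by omega), Int.toNat_natCast,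
        List.getD_eq_getElem fs "" (show k < fs.length by omega), lastD]
      exact Or.inr ⟨h1, hy.symm⟩

theorem foldA_eq' (fs : List String) :
    (PySem.List.pyRange 1 (fs.length : Int) 1).foldl
        (fun acc i =>
          if !((if PySem.Str.len (PySem.List.pyGetD fs (i - 1) "") = 0 then ' '
                else (PySem.Str.pyGet? (PySem.List.pyGetD fs (i - 1) "") (-1)).getD ' ') == '\'' &&
               (if PySem.Str.len (PySem.List.pyGetD fs i "") = 0 then ' '
                else (PySem.Str.pyGet? (PySem.List.pyGetD fs i "") 0).getD ' ') == '\'' ||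
               (PySem.Int.mod (pyReduceAdd ((PySem.List.slice fs none (some i)).map
                   (fun fragment => (PySem.Str.count fragment "\"" : Int)))) 2 == 1 &&
                PySem.Int.mod (pyReduceAdd ((PySem.List.slice fs (some i) none).map
                   (fun fragment => (PySem.Str.count fragment "\"" : Int)))) 2 == 1)) then false
          else acc) true
      = pvGapsAll ((fs.map pvCnt).sum) fs 0 := by
  show (PySem.List.pyRange 1 (fs.length : Int) 1).foldl
      (fun acc i => if !(pvCondA fs i) then false else acc) true = _
  exact foldA_eq fs

theorem bne_comm' (a b : String) : (a != b) = (b != a) := by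
  simp only [bne]
  by_cases h : a = b
  · subst h; rfl
  · rw [beq_eq_false_iff_ne.mpr h, beq_eq_false_iff_ne.mpr (Ne.symm h)]

theorem partA_eq (operator : String) (fs : List String) (ops : List String) :
    (PySem.Set.ofList (ops.filter (fun op => PySem.Str.isIn operator op && operator != op))).foldl
      (fun part other_operator =>
        (PySem.List.pyRange 1 (fs.length : Int) 1).foldl (fun part i =>
          if ((PySem.Str.pyGet? operator 0).getD ' ' == (PySem.Str.pyGet? other_operator 0).getD ' ' &&
              (PySem.Str.pyGet? other_operator 1).getD ' ' ==
                (if PySem.Str.len (PySem.List.pyGetD fs i "") = 0 then (PySem.Str.pyGet? operator 0).getD ' '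
                 else (PySem.Str.pyGet? (PySem.List.pyGetD fs i "") 0).getD ' ')) ||
             ((PySem.Str.pyGet? operator 0).getD ' ' == (PySem.Str.pyGet? other_operator 1).getD ' ' &&
              (PySem.Str.pyGet? other_operator 0).getD ' ' ==
                (if PySem.Str.len (PySem.List.pyGetD fs (i - 1) "") = 0 then (PySem.Str.pyGet? operator 0).getD ' '
                 else (PySem.Str.pyGet? (PySem.List.pyGetD fs (i - 1) "") (-1)).getD ' ')) then true
          else part) part) false
    = ops.any (fun op =>
        (op != operator && PySem.Str.isIn operator op) &&
        (((PySem.Str.pyGet? operator 0).getD ' ' == (PySem.Str.pyGet? op 0).getD ' ' &&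
          PySem.Set.contains
            (PySem.Set.ofList ((PySem.List.slice fs (some 1) none).map
              (fun cur => (PySem.Str.pyGet? cur 0).getD ((PySem.Str.pyGet? operator 0).getD ' '))))
            ((PySem.Str.pyGet? op 1).getD ' ')) ||
         ((PySem.Str.pyGet? operator 0).getD ' ' == (PySem.Str.pyGet? op 1).getD ' ' &&
          PySem.Set.contains
            (PySem.Set.ofList ((PySem.List.slice fs none (some (-1))).map
              (fun prev => (PySem.Str.pyGet? prev (-1)).getD ((PySem.Str.pyGet? operator 0).getD ' '))))
            ((PySem.Str.pyGet? op 0).getD ' ')))) := by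
  have hb : (fun (part : Bool) (other_operator : String) =>
      (PySem.List.pyRange 1 (fs.length : Int) 1).foldl (fun part i =>
        if ((PySem.Str.pyGet? operator 0).getD ' ' == (PySem.Str.pyGet? other_operator 0).getD ' ' &&
            (PySem.Str.pyGet? other_operator 1).getD ' ' ==
              (if PySem.Str.len (PySem.List.pyGetD fs i "") = 0 then (PySem.Str.pyGet? operator 0).getD ' '
               else (PySem.Str.pyGet? (PySem.List.pyGetD fs i "") 0).getD ' ')) ||
           ((PySem.Str.pyGet? operator 0).getD ' ' == (PySem.Str.pyGet? other_operator 1).getD ' ' &&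
            (PySem.Str.pyGet? other_operator 0).getD ' ' ==
              (if PySem.Str.len (PySem.List.pyGetD fs (i - 1) "") = 0 then (PySem.Str.pyGet? operator 0).getD ' '
               else (PySem.Str.pyGet? (PySem.List.pyGetD fs (i - 1) "") (-1)).getD ' ')) then true
        else part) part)
      = (fun part other_operator => part ||
          (PySem.List.pyRange 1 (fs.length : Int) 1).any (fun i =>
            ((PySem.Str.pyGet? operator 0).getD ' ' == (PySem.Str.pyGet? other_operator 0).getD ' ' &&
             (PySem.Str.pyGet? other_operator 1).getD ' ' ==
               (if PySem.Str.len (PySem.List.pyGetD fs i "") = 0 then (PySem.Str.pyGet? operator 0).getD ' '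
                else (PySem.Str.pyGet? (PySem.List.pyGetD fs i "") 0).getD ' ')) ||
            ((PySem.Str.pyGet? operator 0).getD ' ' == (PySem.Str.pyGet? other_operator 1).getD ' ' &&
             (PySem.Str.pyGet? other_operator 0).getD ' ' ==
               (if PySem.Str.len (PySem.List.pyGetD fs (i - 1) "") = 0 then (PySem.Str.pyGet? operator 0).getD ' '
                else (PySem.Str.pyGet? (PySem.List.pyGetD fs (i - 1) "") (-1)).getD ' ')))) := by
    funext part other_operator
    exact PySem.List.foldl_if_true_eq _ _ _
  rw [hb]
  rw [foldl_or, Bool.false_or, any_ofList, List.any_filter]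
  refine PySem.List.any_congr_mem ?_
  intro op hop
  rw [opCond_eq operator fs op, bne_comm' operator op,
    Bool.and_comm (PySem.Str.isIn operator op) (op != operator)]


-- ===== VERDICT (by name: the statement is the Claim_ definition above) =====
theorem operator_is_present_spec : Claim_equal_operator_is_present := by
  intro operator line ops hdom hpre
  unfold Spec_operator_is_present
  cases hIn : PySem.Str.isIn operator line with
  | false =>
    have hIn' : PySem.Chars.isIn operator.toList line.toList = false := by simpa using hIn
    simp [operator_is_present, operator_is_present_alt, hIn']
  | true =>
    have hIn' : PySem.Chars.isIn operator.toList line.toList = true := by simpa using hIn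
    cases hsp : PySem.Str.split? line operator with
    | none => simp [operator_is_present, operator_is_present_alt, hIn', hsp]
    | some fs =>
      simp only [operator_is_present, operator_is_present_alt, hIn, hsp, Bool.not_true,
        Bool.false_eq_true, if_false, if_true]
      by_cases hlen : 1 < fs.length
      · rw [if_pos hlen]
        rw [foldA_eq' fs, partA_eq operator fs ops, altScanB_eq]
        rw [show (fun f => (PySem.Str.count f "\"" : Int)) = pvCnt from rfl]
        cases pvGapsAll ((fs.map pvCnt).sum) fs 0 <;> simp
      · rw [if_neg hlen]
        have hz : fs.zip (fs.drop 1) = [] := by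
          match fs with
          | [] => rfl
          | [f] => rfl
          | f1 :: f2 :: r => exact absurd (by simp) hlen
        rw [hz]
        simp [altScanB]
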